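-- pv_equiv track=rewrite | github.com/Grau720/vuln5g | services/ingest/keywords/keyword_index.py | build_keyword_index
-- ===== SOURCE A (Python) =====
-- def build_keyword_index(cve_id, nombre, descripcion, tipo, etiquetas, protocolo, servicio, puertos):
--     words = set()
--
--     def add(x):
--         if not x:
--             return
--         if isinstance(x, list):
--             for v in x:
--                 add(v)
--         else:
--             s = str(x).lower().strip()
--             if len(s) > 1:
--                 words.add(s)
--
--     add(cve_id)
--     add(nombre)
--     add(descripcion)
--     add(tipo)
--     add(etiquetas)
--     add(protocolo)
--     add(servicio)
--
--     for p in puertos: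
--         add(str(p))
--
--     return sorted(words)
-- ===== SOURCE B (Python) =====
-- def build_keyword_index(cve_id, nombre, descripcion, tipo, etiquetas, protocolo, servicio, puertos):
--     # iterative worklist flattener instead of A's recursive helper
--     work = [cve_id, nombre, descripcion, tipo, etiquetas, protocolo, servicio]
--     work += [str(p) for p in puertos]
--     words = set()
--     i = 0
--     while i < len(work):
--         x = work[i]
--         i += 1
--         if not x:
--             continue
--         if isinstance(x, list):
--             work.extend(x)
--         else:
--             s = str(x).lower().strip()
--             if len(s) > 1:
--                 words.add(s)
--     return sorted(words)
-- ===== Notes on version B (the rewrite author's own statement) =====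
-- stated objective: alternative
-- what changed: Replaced the recursive nested add() helper with an iterative worklist flattener: all eight arguments (ports stringified) are pushed onto one work list, which is scanned by index, lists being expanded back onto the list, with the same falsy-skip and normalization filter, ending in sorted(words).
import Mathlib
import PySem

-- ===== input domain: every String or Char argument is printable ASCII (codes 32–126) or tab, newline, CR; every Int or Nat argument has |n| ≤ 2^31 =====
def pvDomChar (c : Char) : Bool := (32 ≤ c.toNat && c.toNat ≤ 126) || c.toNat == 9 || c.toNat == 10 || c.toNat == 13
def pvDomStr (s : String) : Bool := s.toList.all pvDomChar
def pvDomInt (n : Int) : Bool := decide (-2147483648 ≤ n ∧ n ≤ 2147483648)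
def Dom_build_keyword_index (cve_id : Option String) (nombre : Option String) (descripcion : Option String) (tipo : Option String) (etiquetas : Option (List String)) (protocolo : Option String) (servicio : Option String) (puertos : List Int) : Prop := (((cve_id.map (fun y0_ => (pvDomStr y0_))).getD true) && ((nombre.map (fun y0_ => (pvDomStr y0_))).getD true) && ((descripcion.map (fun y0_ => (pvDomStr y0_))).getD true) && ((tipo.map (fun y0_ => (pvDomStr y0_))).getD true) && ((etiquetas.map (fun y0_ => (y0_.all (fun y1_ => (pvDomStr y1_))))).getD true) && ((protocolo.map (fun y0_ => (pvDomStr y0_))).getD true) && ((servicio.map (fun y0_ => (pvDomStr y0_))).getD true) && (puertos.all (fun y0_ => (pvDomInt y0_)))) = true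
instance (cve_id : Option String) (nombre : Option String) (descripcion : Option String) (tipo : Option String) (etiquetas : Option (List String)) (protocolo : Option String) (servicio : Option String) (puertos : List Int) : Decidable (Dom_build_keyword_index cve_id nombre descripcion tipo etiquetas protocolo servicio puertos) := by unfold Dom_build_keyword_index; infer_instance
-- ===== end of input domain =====

-- Port A vs B: A's recursive add() helper vs B's iterative worklist flattener; same filtering/normalization, equal results.
-- ===== PORT A =====
def pvAddScal (w : PySem.Set String) (x : String) : PySem.Set String :=
  if x = "" then w
  else
    let s := PySem.Str.strip (PySem.Str.lower x)
    if 1 < PySem.Str.len s then PySem.Set.add w s else w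

def pvAddOpt (w : PySem.Set String) (o : Option String) : PySem.Set String :=
  match o with
  | none => w
  | some s => pvAddScal w s

def pvAddTags (w : PySem.Set String) (o : Option (List String)) : PySem.Set String :=
  match o with
  | none => w
  | some l => if l.isEmpty then w else l.foldl pvAddScal w

def build_keyword_index (cve_id : Option String) (nombre : Option String) (descripcion : Option String) (tipo : Option String) (etiquetas : Option (List String)) (protocolo : Option String) (servicio : Option String) (puertos : List Int) : List String :=
  let w : PySem.Set String := PySem.Set.empty
  let w := pvAddOpt w cve_id
  let w := pvAddOpt w nombre
  let w := pvAddOpt w descripcion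
  let w := pvAddOpt w tipo
  let w := pvAddTags w etiquetas
  let w := pvAddOpt w protocolo
  let w := pvAddOpt w servicio
  let w := puertos.foldl (fun w p => pvAddScal w (PySem.Int.toStr p)) w
  PySem.List.sorted w (fun x => x) false

-- ===== PORT B =====
inductive PVItem where
  | scal : Option String → PVItem
  | tags : Option (List String) → PVItem

def pvSize : PVItem → Nat
  | .scal _ => 1
  | .tags none => 1
  | .tags (some l) => 2 + l.length

def pvBLoop : List PVItem → PySem.Set String → PySem.Set String
  | [], w => w
  | .scal none :: rest, w => pvBLoop rest w
  | .scal (some x) :: rest, w =>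
      if x = "" then pvBLoop rest w
      else
        let s := PySem.Str.strip (PySem.Str.lower x)
        if 1 < PySem.Str.len s then pvBLoop rest (PySem.Set.add w s) else pvBLoop rest w
  | .tags none :: rest, w => pvBLoop rest w
  | .tags (some l) :: rest, w =>
      if l.isEmpty then pvBLoop rest w
      else pvBLoop (rest ++ l.map (fun s => PVItem.scal (some s))) w
termination_by work _ => (work.map pvSize).sum
decreasing_by all_goals simp [pvSize, List.sum_append, Function.comp_def] <;> omega

def build_keyword_index_alt (cve_id : Option String) (nombre : Option String) (descripcion : Option String) (tipo : Option String) (etiquetas : Option (List String)) (protocolo : Option String) (servicio : Option String) (puertos : List Int) : List String :=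
  let work := [PVItem.scal cve_id, PVItem.scal nombre, PVItem.scal descripcion, PVItem.scal tipo,
               PVItem.tags etiquetas, PVItem.scal protocolo, PVItem.scal servicio]
              ++ puertos.map (fun p => PVItem.scal (some (PySem.Int.toStr p)))
  PySem.List.sorted (pvBLoop work PySem.Set.empty) (fun x => x) false

-- ===== PRECONDITION & SPEC =====
def Spec_build_keyword_index (cve_id : Option String) (nombre : Option String) (descripcion : Option String) (tipo : Option String) (etiquetas : Option (List String)) (protocolo : Option String) (servicio : Option String) (puertos : List Int) (out : List String) : Prop := out = build_keyword_index_alt cve_id nombre descripcion tipo etiquetas protocolo servicio puertos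
instance (cve_id : Option String) (nombre : Option String) (descripcion : Option String) (tipo : Option String) (etiquetas : Option (List String)) (protocolo : Option String) (servicio : Option String) (puertos : List Int) (out : List String) : Decidable (Spec_build_keyword_index cve_id nombre descripcion tipo etiquetas protocolo servicio puertos out) := by unfold Spec_build_keyword_index; infer_instance

-- ===== CLAIM (what is proved, stated in full; the proofs are below) =====
def Claim_equal_build_keyword_index : Prop := ∀ (cve_id : Option String) (nombre : Option String) (descripcion : Option String) (tipo : Option String) (etiquetas : Option (List String)) (protocolo : Option String) (servicio : Option String) (puertos : List Int), Dom_build_keyword_index cve_id nombre descripcion tipo etiquetas protocolo servicio puertos → Spec_build_keyword_index cve_id nombre descripcion tipo etiquetas protocolo servicio puertos (build_keyword_index cve_id nombre descripcion tipo etiquetas protocolo servicio puertos)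

-- ===== LEMMAS AND PROOFS =====
def pvKeep (x : String) : List String :=
  if x = "" then []
  else
    let s := PySem.Str.strip (PySem.Str.lower x)
    if 1 < PySem.Str.len s then [s] else []

def pvItemStrs : PVItem → List String
  | .scal o => o.elim [] pvKeep
  | .tags o => (o.getD []).flatMap pvKeep

theorem mem_pvAddScal (w : PySem.Set String) (s x : String) :
    x ∈ pvAddScal w s ↔ x ∈ w ∨ x ∈ pvKeep s := by
  simp only [pvAddScal, pvKeep]
  split_ifs <;> simp [PySem.Set.mem_add]

theorem nodup_pvAddScal (w : PySem.Set String) (s : String) (h : w.Nodup) :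
    (pvAddScal w s).Nodup := by
  simp only [pvAddScal]
  split_ifs <;> first | exact h | exact PySem.Set.nodup_add _ _ h

theorem mem_foldl_pvAddScal {α : Type} (f : α → String) (l : List α) (w : PySem.Set String) (x : String) :
    x ∈ l.foldl (fun w a => pvAddScal w (f a)) w ↔ x ∈ w ∨ x ∈ l.flatMap (fun a => pvKeep (f a)) := by
  induction l generalizing w with
  | nil => simp
  | cons a t ih => simp [ih, mem_pvAddScal, or_assoc]

theorem nodup_foldl_pvAddScal {α : Type} (f : α → String) (l : List α) (w : PySem.Set String) (h : w.Nodup) :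
    (l.foldl (fun w a => pvAddScal w (f a)) w).Nodup := by
  induction l generalizing w with
  | nil => exact h
  | cons a t ih => exact ih _ (nodup_pvAddScal _ _ h)

theorem mem_pvAddOpt (w : PySem.Set String) (o : Option String) (x : String) :
    x ∈ pvAddOpt w o ↔ x ∈ w ∨ x ∈ o.elim [] pvKeep := by
  cases o <;> simp [pvAddOpt, mem_pvAddScal]

theorem nodup_pvAddOpt (w : PySem.Set String) (o : Option String) (h : w.Nodup) :
    (pvAddOpt w o).Nodup := by
  cases o <;> first | exact h | exact nodup_pvAddScal _ _ h

theorem mem_pvAddTags (w : PySem.Set String) (o : Option (List String)) (x : String) :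
    x ∈ pvAddTags w o ↔ x ∈ w ∨ x ∈ (o.getD []).flatMap pvKeep := by
  cases o with
  | none => simp [pvAddTags]
  | some l =>
    simp only [pvAddTags, Option.getD_some]
    split_ifs with hl
    · simp [List.isEmpty_iff.1 hl]
    · have := mem_foldl_pvAddScal (fun s => s) l w x
      simpa using this

theorem nodup_pvAddTags (w : PySem.Set String) (o : Option (List String)) (h : w.Nodup) :
    (pvAddTags w o).Nodup := by
  cases o with
  | none => exact h
  | some l =>
    simp only [pvAddTags]
    split_ifs with hl
    · exact h
    · have := nodup_foldl_pvAddScal (fun s => s) l w h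
      simpa using this

theorem pvItemStrs_scal (o : Option String) : pvItemStrs (PVItem.scal o) = o.elim [] pvKeep := rfl
theorem pvItemStrs_tags (o : Option (List String)) : pvItemStrs (PVItem.tags o) = (o.getD []).flatMap pvKeep := rfl

theorem pvKeep_pos (y : String) (hy : ¬y = "")
    (hlen : 1 < PySem.Str.len (PySem.Str.strip (PySem.Str.lower y))) :
    pvKeep y = [PySem.Str.strip (PySem.Str.lower y)] := by
  simp only [pvKeep]
  rw [if_neg hy, if_pos hlen]

theorem pvKeep_neg (y : String) (hy : ¬y = "")
    (hlen : ¬1 < PySem.Str.len (PySem.Str.strip (PySem.Str.lower y))) :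
    pvKeep y = [] := by
  simp only [pvKeep]
  rw [if_neg hy, if_neg hlen]

theorem mem_pvBLoop (work : List PVItem) (w : PySem.Set String) (x : String) :
    x ∈ pvBLoop work w ↔ x ∈ w ∨ x ∈ work.flatMap pvItemStrs := by
  induction work, w using pvBLoop.induct with
  | case1 w => simp [pvBLoop]
  | case2 rest w ih => simp [pvBLoop, pvItemStrs, ih]
  | case3 rest w ih => simp [pvBLoop, pvItemStrs, pvKeep, ih]
  | case4 y rest w hy s hlen ih =>
    have hlen' : 1 < PySem.Str.len (PySem.Str.strip (PySem.Str.lower y)) := hlen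
    simp only [pvBLoop.eq_3]
    rw [if_neg hy, if_pos hlen', ih]
    simp only [List.flatMap_cons, pvItemStrs_scal, Option.elim,
      pvKeep_pos y hy hlen', PySem.Set.mem_add, List.mem_append, List.mem_singleton]
    exact or_assoc
  | case5 y rest w hy s hlen ih =>
    have hlen' : ¬1 < PySem.Str.len (PySem.Str.strip (PySem.Str.lower y)) := hlen
    simp only [pvBLoop.eq_3]
    rw [if_neg hy, if_neg hlen', ih]
    simp [List.flatMap_cons, pvItemStrs_scal, Option.elim, pvKeep_neg y hy hlen']
  | case6 rest w ih => simp [pvBLoop, pvItemStrs, ih]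
  | case7 l rest w hl ih =>
    simp [pvBLoop, pvItemStrs, List.isEmpty_iff.1 hl, ih]
  | case8 l rest w hl ih =>
    simp only [List.map_attach_eq_pmap, List.pmap_eq_map] at ih
    simp only [pvBLoop.eq_5]
    rw [if_neg hl, ih]
    simp only [List.flatMap_cons, List.flatMap_append, List.flatMap_map,
      pvItemStrs_scal, pvItemStrs_tags, Option.elim, Option.getD_some, List.mem_append]
    exact or_congr_right or_comm

theorem nodup_pvBLoop : ∀ (work : List PVItem) (w : PySem.Set String), w.Nodup → (pvBLoop work w).Nodup := by
  intro work w
  induction work, w using pvBLoop.induct with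
  | case1 w => intro h; simpa [pvBLoop] using h
  | case2 rest w ih => intro h; simpa [pvBLoop] using ih h
  | case3 rest w ih => intro h; simpa [pvBLoop] using ih h
  | case4 y rest w hy s hlen ih =>
    intro h
    have hlen' : 1 < PySem.Str.len (PySem.Str.strip (PySem.Str.lower y)) := hlen
    simp only [pvBLoop.eq_3]
    rw [if_neg hy, if_pos hlen']
    exact ih (PySem.Set.nodup_add _ _ h)
  | case5 y rest w hy s hlen ih =>
    intro h
    have hlen' : ¬1 < PySem.Str.len (PySem.Str.strip (PySem.Str.lower y)) := hlen
    simp only [pvBLoop.eq_3]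
    rw [if_neg hy, if_neg hlen']
    exact ih h
  | case6 rest w ih => intro h; simpa [pvBLoop] using ih h
  | case7 l rest w hl ih => intro h; simpa [pvBLoop, hl] using ih h
  | case8 l rest w hl ih =>
    intro h
    simp only [List.map_attach_eq_pmap, List.pmap_eq_map] at ih
    simp only [pvBLoop.eq_5]
    rw [if_neg hl]
    exact ih h

-- ===== VERDICT (by name: the statement is the Claim_ definition above) =====
theorem build_keyword_index_spec : Claim_equal_build_keyword_index := by
  intro cve_id nombre descripcion tipo etiquetas protocolo servicio puertos _
  unfold Spec_build_keyword_index build_keyword_index build_keyword_index_alt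
  apply PySem.List.sorted_eq_sorted_of_perm _ _ _ (fun a b h => h)
  apply (List.perm_ext_iff_of_nodup ?_ ?_).2
  · intro x
    rw [mem_pvBLoop]
    simp only [mem_foldl_pvAddScal, mem_pvAddOpt, mem_pvAddTags,
      List.flatMap_append, List.flatMap_cons, List.flatMap_nil, List.flatMap_map,
      List.mem_append, PySem.Set.empty]
    simp only [pvItemStrs, Option.elim, List.not_mem_nil]
    cases cve_id <;> cases nombre <;> cases descripcion <;> cases tipo <;>
      cases protocolo <;> cases servicio <;> simp [or_assoc]
  · exact nodup_foldl_pvAddScal _ _ _ (nodup_pvAddOpt _ _ (nodup_pvAddOpt _ _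
      (nodup_pvAddTags _ _ (nodup_pvAddOpt _ _ (nodup_pvAddOpt _ _ (nodup_pvAddOpt _ _
      (nodup_pvAddOpt _ _ List.nodup_nil)))))))
  · exact nodup_pvBLoop _ _ List.nodup_nil
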